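-- pv_equiv track=rewrite | github.com/jiazeyu1987/RagFlowAuth | scripts/run_doc_e2e.py | normalize_scopes
-- ===== SOURCE A (Python) =====
-- def normalize_scopes(raw_scopes: list[str]) -> list[str]:
--     scopes = raw_scopes or ["unit", "role"]
--     ordered = []
--     seen = set()
--     for scope in scopes:
--         if scope == "all":
--             for expanded in ("unit", "role"):
--                 if expanded not in seen:
--                     ordered.append(expanded)
--                     seen.add(expanded)
--             continue
--         if scope not in {"unit", "role"}:
--             raise SystemExit(f"[ERROR] Unsupported scope: {scope}")
--         if scope not in seen:
--             ordered.append(scope)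
--             seen.add(scope)
--     return ordered
-- ===== SOURCE B (Python) =====
-- def normalize_scopes(raw_scopes: list[str]) -> list[str]:
--     scopes = raw_scopes or ["unit", "role"]
--     for scope in scopes:
--         if scope not in ("all", "unit", "role"):
--             raise SystemExit(f"[ERROR] Unsupported scope: {scope}")
--
--     def first_pos(name):
--         # index of the first element that yields `name` ("all" yields both)
--         for i, scope in enumerate(scopes):
--             if scope == name or scope == "all":
--                 return i
--         return None
--
--     u = first_pos("unit")
--     r = first_pos("role")
--     if u is None:
--         return [] if r is None else ["role"]
--     if r is None:
--         return ["unit"]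
--     # a tie means both came from the same "all", which emits unit first
--     return ["unit", "role"] if u <= r else ["role", "unit"]
-- ===== Notes on version B (the rewrite author's own statement) =====
-- stated objective: alternative
-- what changed: A builds the output with a stateful expand/validate/dedup pass over the list; B validates first, then computes the first-occurrence position of each of the only two possible output scopes and emits the answer as a closed-form list ordered by those positions.
import Mathlib
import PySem

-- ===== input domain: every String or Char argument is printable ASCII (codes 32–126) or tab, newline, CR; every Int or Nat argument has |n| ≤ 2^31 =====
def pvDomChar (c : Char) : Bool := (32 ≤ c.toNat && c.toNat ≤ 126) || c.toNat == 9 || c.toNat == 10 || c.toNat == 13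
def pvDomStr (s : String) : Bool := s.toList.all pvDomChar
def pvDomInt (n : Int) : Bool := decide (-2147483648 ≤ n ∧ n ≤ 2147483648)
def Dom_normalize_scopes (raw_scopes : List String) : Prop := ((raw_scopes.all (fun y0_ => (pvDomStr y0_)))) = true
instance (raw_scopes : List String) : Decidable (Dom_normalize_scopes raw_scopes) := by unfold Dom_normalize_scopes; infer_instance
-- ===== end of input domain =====

-- B replaces A's stateful expand/validate/dedup pass by: validate, then order the two possible outputs by their first-occurrence positions (alternative decomposition, same cost).

-- ===== PORT A =====
-- loop body of A: the "all" branch runs the inner for over ("unit","role"); the unsupported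
-- branch raises SystemExit — excluded by Pre_, the port leaves the state unchanged there
def pvStepA (st : List String × PySem.Set String) (scope : String) : List String × PySem.Set String :=
  if scope == "all" then
    ["unit", "role"].foldl
      (fun st expanded =>
        if PySem.Set.contains st.2 expanded then st
        else (st.1 ++ [expanded], PySem.Set.add st.2 expanded)) st
  else if !(scope == "unit" || scope == "role") then st   -- raise SystemExit(...): outside Pre_
  else if PySem.Set.contains st.2 scope then st
  else (st.1 ++ [scope], PySem.Set.add st.2 scope)

def normalize_scopes (raw_scopes : List String) : List String :=
  let scopes := if raw_scopes.isEmpty then ["unit", "role"] else raw_scopes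
  (scopes.foldl pvStepA ([], PySem.Set.empty)).1

-- ===== PORT B =====
-- first_pos of Source B: index of the first element yielding `name` ("all" yields both)
def pvFirstPos (name : String) : List String → Nat → Option Nat
  | [], _ => none
  | s :: rest, i => if s == name || s == "all" then some i else pvFirstPos name rest (i + 1)

def normalize_scopes_alt (raw_scopes : List String) : List String :=
  let scopes := if raw_scopes.isEmpty then ["unit", "role"] else raw_scopes
  -- Source B's validation loop raises SystemExit outside Pre_ and changes no state: no-op here
  let u := pvFirstPos "unit" scopes 0
  let r := pvFirstPos "role" scopes 0
  match u, r with
  | none, none => []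
  | none, some _ => ["role"]
  | some _, none => ["unit"]
  | some ui, some ri => if ui ≤ ri then ["unit", "role"] else ["role", "unit"]

-- ===== PRECONDITION & SPEC =====
-- Pre_ excludes exactly the inputs containing an unsupported scope, on which both A and B raise SystemExit.
def Pre_normalize_scopes (raw_scopes : List String) : Prop :=
  (raw_scopes.all (fun s => s == "all" || s == "unit" || s == "role")) = true
instance (raw_scopes : List String) : Decidable (Pre_normalize_scopes raw_scopes) := by
  unfold Pre_normalize_scopes; infer_instance
def pvWitness_normalize_scopes : List String := ["all", "unit", "role", "unit"]

def Spec_normalize_scopes (raw_scopes : List String) (out : List String) : Prop := out = normalize_scopes_alt raw_scopes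
instance (raw_scopes : List String) (out : List String) : Decidable (Spec_normalize_scopes raw_scopes out) := by unfold Spec_normalize_scopes; infer_instance

-- ===== CLAIM (what is proved, stated in full; the proofs are below) =====
def Claim_equal_normalize_scopes : Prop := ∀ (raw_scopes : List String), Dom_normalize_scopes raw_scopes → Pre_normalize_scopes raw_scopes → Spec_normalize_scopes raw_scopes (normalize_scopes raw_scopes)

-- ===== LEMMAS AND PROOFS =====

-- the suffix A's fold appends past a state whose seen-set contains "unit" iff u0 and "role" iff r0
def pvSuffix (u0 r0 : Bool) : List String → List String
  | [] => []
  | s :: rest =>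
    if s == "all" then
      (if u0 then [] else ["unit"]) ++ (if r0 then [] else ["role"]) ++ pvSuffix true true rest
    else if s == "unit" then (if u0 then [] else ["unit"]) ++ pvSuffix true r0 rest
    else if s == "role" then (if r0 then [] else ["role"]) ++ pvSuffix u0 true rest
    else pvSuffix u0 r0 rest   -- unreachable for valid lists

theorem foldA_eq_suffix (scopes : List String)
    (h : ∀ x ∈ scopes, x = "all" ∨ x = "unit" ∨ x = "role") :
    ∀ (ord : List String) (seen : PySem.Set String),
      (scopes.foldl pvStepA (ord, seen)).1
        = ord ++ pvSuffix (seen.contains "unit") (seen.contains "role") scopes := by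
  induction scopes with
  | nil => intro ord seen; simp [pvSuffix]
  | cons x rest ih =>
    intro ord seen
    have hrest : ∀ y ∈ rest, y = "all" ∨ y = "unit" ∨ y = "role" :=
      fun y hy => h y (List.mem_cons_of_mem _ hy)
    rcases h x List.mem_cons_self with hx | hx | hx <;> subst hx <;>
      simp only [List.foldl_cons, pvStepA, pvSuffix] <;>
      by_cases hu : "unit" ∈ seen <;>
      by_cases hr : "role" ∈ seen <;>
      simp [hu, hr, ih hrest, PySem.Set.contains, PySem.Set.add]
  
theorem pvFirstPos_succ (name : String) (l : List String) :
    ∀ i, pvFirstPos name l (i + 1) = (pvFirstPos name l i).map (· + 1) := by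
  induction l with
  | nil => intro i; simp [pvFirstPos]
  | cons s rest ih =>
    intro i
    by_cases hs : (s == name || s == "all") = true <;> simp [pvFirstPos, hs, ih]

theorem pvSuffix_tt (rest : List String)
    (h : ∀ x ∈ rest, x = "all" ∨ x = "unit" ∨ x = "role") :
    pvSuffix true true rest = [] := by
  induction rest with
  | nil => rfl
  | cons x t ih =>
    have ht := fun y hy => h y (List.mem_cons_of_mem _ hy)
    rcases h x List.mem_cons_self with hx | hx | hx <;> subst hx <;> simp [pvSuffix, ih ht]

theorem pvSuffix_tf (rest : List String)
    (h : ∀ x ∈ rest, x = "all" ∨ x = "unit" ∨ x = "role") :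
    pvSuffix true false rest
      = (match pvFirstPos "role" rest 0 with | none => [] | some _ => ["role"]) := by
  induction rest with
  | nil => rfl
  | cons x t ih =>
    have ht := fun y hy => h y (List.mem_cons_of_mem _ hy)
    rcases h x List.mem_cons_self with hx | hx | hx <;> subst hx <;>
      simp [pvSuffix, pvFirstPos, pvSuffix_tt t ht, pvFirstPos_succ, ih ht] <;>
      cases pvFirstPos "role" t 0 <;> simp
  
theorem pvSuffix_ft (rest : List String)
    (h : ∀ x ∈ rest, x = "all" ∨ x = "unit" ∨ x = "role") :
    pvSuffix false true rest
      = (match pvFirstPos "unit" rest 0 with | none => [] | some _ => ["unit"]) := by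
  induction rest with
  | nil => rfl
  | cons x t ih =>
    have ht := fun y hy => h y (List.mem_cons_of_mem _ hy)
    rcases h x List.mem_cons_self with hx | hx | hx <;> subst hx <;>
      simp [pvSuffix, pvFirstPos, pvSuffix_tt t ht, pvFirstPos_succ, ih ht] <;>
      cases pvFirstPos "unit" t 0 <;> simp

theorem pvSuffix_ff (scopes : List String)
    (h : ∀ x ∈ scopes, x = "all" ∨ x = "unit" ∨ x = "role") :
    pvSuffix false false scopes
      = (match pvFirstPos "unit" scopes 0, pvFirstPos "role" scopes 0 with
         | none, none => []
         | none, some _ => ["role"]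
         | some _, none => ["unit"]
         | some ui, some ri => if ui ≤ ri then ["unit", "role"] else ["role", "unit"]) := by
  induction scopes with
  | nil => rfl
  | cons x t ih =>
    have ht := fun y hy => h y (List.mem_cons_of_mem _ hy)
    rcases h x List.mem_cons_self with hx | hx | hx <;> subst hx
    · simp [pvSuffix, pvFirstPos, pvSuffix_tt t ht]
    · simp [pvSuffix, pvFirstPos, pvSuffix_tf t ht, pvFirstPos_succ]
      cases pvFirstPos "role" t 0 <;> simp
    · simp [pvSuffix, pvFirstPos, pvSuffix_ft t ht, pvFirstPos_succ]
      cases pvFirstPos "unit" t 0 <;> simp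

-- ===== VERDICT (by name: the statement is the Claim_ definition above) =====
theorem normalize_scopes_spec : Claim_equal_normalize_scopes := by
  intro raw_scopes _ hpre
  unfold Spec_normalize_scopes normalize_scopes normalize_scopes_alt
  simp only []
  set scopes := if raw_scopes.isEmpty then ["unit", "role"] else raw_scopes with hs
  have hvalid : ∀ x ∈ scopes, x = "all" ∨ x = "unit" ∨ x = "role" := by
    intro x hx
    rw [hs] at hx
    split at hx
    · simp at hx; rcases hx with rfl | rfl <;> tauto
    · unfold Pre_normalize_scopes at hpre
      simp only [List.all_eq_true] at hpre
      have := hpre x hx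
      simp only [Bool.or_eq_true, beq_iff_eq] at this
      tauto
  rw [foldA_eq_suffix scopes hvalid [] PySem.Set.empty]
  simpa [PySem.Set.empty, PySem.Set.contains] using pvSuffix_ff scopes hvalid
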